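-- pv_equiv track=rewrite | github.com/ivorytower1026/mutil-user-agent-backend | src/agent_skills/skill_command_history.py | extract_dependencies_from_commands
-- ===== SOURCE A (Python) =====
-- def extract_dependencies_from_commands(commands: list[str]) -> dict:
--     """Extract dependency info from command list."""
--
--     dependencies = {
--         "pip": [],
--         "apt": [],
--         "npm": [],
--         "downloaded": [],
--         "other_install": [],
--         "raw_commands": commands
--     }
--
--     for cmd in commands:
--         if not cmd.strip():
--             continue
--         cmd_lower = cmd.lower()
--
--         if "pip install" in cmd_lower or "pip3 install" in cmd_lower:
--             dependencies["pip"].append(cmd)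
--         elif "apt" in cmd_lower and "install" in cmd_lower:
--             dependencies["apt"].append(cmd)
--         elif "npm install" in cmd_lower:
--             dependencies["npm"].append(cmd)
--         elif "curl" in cmd_lower or "wget" in cmd_lower:
--             dependencies["downloaded"].append(cmd)
--         elif any(x in cmd_lower for x in ["setup.py install", "make install", "dpkg -i", "conda install"]):
--             dependencies["other_install"].append(cmd)
--
--     return dependencies
-- ===== SOURCE B (Python) =====
-- RULES = [
--     ("pip", lambda c: "pip install" in c or "pip3 install" in c),
--     ("apt", lambda c: "apt" in c and "install" in c),
--     ("npm", lambda c: "npm install" in c),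
--     ("downloaded", lambda c: "curl" in c or "wget" in c),
--     ("other_install", lambda c: any(x in c for x in ["setup.py install", "make install", "dpkg -i", "conda install"])),
-- ]
--
--
-- def _classify(cmd):
--     """First matching rule key for a command, or None."""
--     if not cmd.strip():
--         return None
--     c = cmd.lower()
--     for key, pred in RULES:
--         if pred(c):
--             return key
--     return None
--
--
-- def extract_dependencies_from_commands(commands: list[str]) -> dict:
--     """Extract dependency info from command list."""
--     deps = {key: [cmd for cmd in commands if _classify(cmd) == key] for key, _ in RULES}
--     deps["raw_commands"] = commands
--     return deps
-- ===== Notes on version B (the rewrite author's own statement) =====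
-- stated objective: idiomatic
-- what changed: Replaces the single-pass if/elif cascade mutating dict buckets with a data-driven rule table plus a classify helper, building each bucket by an independent filter comprehension over the commands.
import Mathlib
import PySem

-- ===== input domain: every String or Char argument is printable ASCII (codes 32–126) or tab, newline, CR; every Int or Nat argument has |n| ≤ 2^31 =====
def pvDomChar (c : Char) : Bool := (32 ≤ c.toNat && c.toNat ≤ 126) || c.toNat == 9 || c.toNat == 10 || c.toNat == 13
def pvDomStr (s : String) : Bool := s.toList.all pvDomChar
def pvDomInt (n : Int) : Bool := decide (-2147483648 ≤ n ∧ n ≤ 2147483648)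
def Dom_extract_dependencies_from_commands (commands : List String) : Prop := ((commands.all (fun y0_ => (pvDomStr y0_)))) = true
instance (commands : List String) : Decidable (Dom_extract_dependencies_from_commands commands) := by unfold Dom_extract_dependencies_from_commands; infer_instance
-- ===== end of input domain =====

-- B replaces A's if/elif cascade with a rule table + classify helper and builds each bucket by its own filter (idiomatic; same cost).

-- ===== PORT A =====
-- state: the five buckets (pip, apt, npm, downloaded, other_install), appended to in place as in A
def pvStepA (st : List String × List String × List String × List String × List String) (cmd : String) :
    List String × List String × List String × List String × List String :=
  let (pip, apt, npm, dl, oth) := st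
  if PySem.Str.strip cmd = "" then st
  else
    let c := PySem.Str.lower cmd
    if PySem.Str.isIn "pip install" c || PySem.Str.isIn "pip3 install" c then (pip ++ [cmd], apt, npm, dl, oth)
    else if PySem.Str.isIn "apt" c && PySem.Str.isIn "install" c then (pip, apt ++ [cmd], npm, dl, oth)
    else if PySem.Str.isIn "npm install" c then (pip, apt, npm ++ [cmd], dl, oth)
    else if PySem.Str.isIn "curl" c || PySem.Str.isIn "wget" c then (pip, apt, npm, dl ++ [cmd], oth)
    else if ["setup.py install", "make install", "dpkg -i", "conda install"].any (fun x => PySem.Str.isIn x c) then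
      (pip, apt, npm, dl, oth ++ [cmd])
    else st

def extract_dependencies_from_commands (commands : List String) : List (String × List String) :=
  let s := commands.foldl pvStepA ([], [], [], [], [])
  [("pip", s.1), ("apt", s.2.1), ("npm", s.2.2.1), ("downloaded", s.2.2.2.1),
   ("other_install", s.2.2.2.2), ("raw_commands", commands)]

-- ===== PORT B =====
def pvRules : List (String × (String → Bool)) :=
  [("pip", fun c => PySem.Str.isIn "pip install" c || PySem.Str.isIn "pip3 install" c),
   ("apt", fun c => PySem.Str.isIn "apt" c && PySem.Str.isIn "install" c),
   ("npm", fun c => PySem.Str.isIn "npm install" c),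
   ("downloaded", fun c => PySem.Str.isIn "curl" c || PySem.Str.isIn "wget" c),
   ("other_install", fun c => ["setup.py install", "make install", "dpkg -i", "conda install"].any (fun x => PySem.Str.isIn x c))]

def pvClassify (cmd : String) : Option String :=
  if PySem.Str.strip cmd = "" then none
  else (pvRules.find? (fun r => r.2 (PySem.Str.lower cmd))).map (·.1)

def extract_dependencies_from_commands_alt (commands : List String) : List (String × List String) :=
  (pvRules.map (fun r => (r.1, commands.filter (fun cmd => pvClassify cmd == some r.1))))
    ++ [("raw_commands", commands)]

-- ===== PRECONDITION & SPEC =====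
def Spec_extract_dependencies_from_commands (commands : List String) (out : List (String × List String)) : Prop := out = extract_dependencies_from_commands_alt commands
instance (commands : List String) (out : List (String × List String)) : Decidable (Spec_extract_dependencies_from_commands commands out) := by unfold Spec_extract_dependencies_from_commands; infer_instance

-- ===== CLAIM (what is proved, stated in full; the proofs are below) =====
def Claim_equal_extract_dependencies_from_commands : Prop := ∀ (commands : List String), Dom_extract_dependencies_from_commands commands → Spec_extract_dependencies_from_commands commands (extract_dependencies_from_commands commands)

-- ===== LEMMAS AND PROOFS =====

-- one step of A's fold appends the command to the bucket named by pvClassify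
theorem pvStepA_eq (st : List String × List String × List String × List String × List String) (cmd : String) :
    pvStepA st cmd =
      (st.1 ++ if pvClassify cmd == some "pip" then [cmd] else [],
       st.2.1 ++ if pvClassify cmd == some "apt" then [cmd] else [],
       st.2.2.1 ++ if pvClassify cmd == some "npm" then [cmd] else [],
       st.2.2.2.1 ++ if pvClassify cmd == some "downloaded" then [cmd] else [],
       st.2.2.2.2 ++ if pvClassify cmd == some "other_install" then [cmd] else []) := by
  obtain ⟨pip, apt, npm, dl, oth⟩ := st
  by_cases h0 : PySem.Str.strip cmd = ""
  · simp [pvStepA, pvClassify, h0]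
  · cases h1 : (PySem.Str.isIn "pip install" (PySem.Str.lower cmd) || PySem.Str.isIn "pip3 install" (PySem.Str.lower cmd)) with
    | true =>
      have hc : pvClassify cmd = some "pip" := by
        simp only [pvClassify, pvRules, List.find?, h1, if_neg h0]; rfl
      simp only [pvStepA, h1, if_neg h0, hc]; simp
    | false =>
    cases h2 : (PySem.Str.isIn "apt" (PySem.Str.lower cmd) && PySem.Str.isIn "install" (PySem.Str.lower cmd)) with
    | true =>
      have hc : pvClassify cmd = some "apt" := by
        simp only [pvClassify, pvRules, List.find?, h1, h2, if_neg h0]; rfl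
      simp only [pvStepA, h1, h2, if_neg h0, hc]; simp
    | false =>
    cases h3 : PySem.Str.isIn "npm install" (PySem.Str.lower cmd) with
    | true =>
      have hc : pvClassify cmd = some "npm" := by
        simp only [pvClassify, pvRules, List.find?, h1, h2, h3, if_neg h0]; rfl
      simp only [pvStepA, h1, h2, h3, if_neg h0, hc]; simp
    | false =>
    cases h4 : (PySem.Str.isIn "curl" (PySem.Str.lower cmd) || PySem.Str.isIn "wget" (PySem.Str.lower cmd)) with
    | true =>
      have hc : pvClassify cmd = some "downloaded" := by
        simp only [pvClassify, pvRules, List.find?, h1, h2, h3, h4, if_neg h0]; rfl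
      simp only [pvStepA, h1, h2, h3, h4, if_neg h0, hc]; simp
    | false =>
    cases h5 : (["setup.py install", "make install", "dpkg -i", "conda install"].any (fun x => PySem.Str.isIn x (PySem.Str.lower cmd))) with
    | true =>
      have hc : pvClassify cmd = some "other_install" := by
        simp only [pvClassify, pvRules, List.find?, h1, h2, h3, h4, h5, if_neg h0]; rfl
      simp only [pvStepA, h1, h2, h3, h4, h5, if_neg h0, hc]; simp
    | false =>
      have hc : pvClassify cmd = none := by
        simp only [pvClassify, pvRules, List.find?, h1, h2, h3, h4, h5, if_neg h0]; rfl
      simp only [pvStepA, h1, h2, h3, h4, h5, if_neg h0, hc]; simp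

-- the fold from arbitrary accumulators appends exactly the filter-by-classification of the remaining commands
theorem pvFoldA_eq (commands : List String) :
    ∀ pip apt npm dl oth,
      commands.foldl pvStepA (pip, apt, npm, dl, oth) =
        (pip ++ commands.filter (fun cmd => pvClassify cmd == some "pip"),
         apt ++ commands.filter (fun cmd => pvClassify cmd == some "apt"),
         npm ++ commands.filter (fun cmd => pvClassify cmd == some "npm"),
         dl ++ commands.filter (fun cmd => pvClassify cmd == some "downloaded"),
         oth ++ commands.filter (fun cmd => pvClassify cmd == some "other_install")) := by
  induction commands with
  | nil => intro pip apt npm dl oth; simp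
  | cons cmd rest ih =>
    intro pip apt npm dl oth
    simp only [List.foldl_cons, List.filter_cons, pvStepA_eq, ih]
    by_cases c1 : (pvClassify cmd == some "pip") = true <;>
      by_cases c2 : (pvClassify cmd == some "apt") = true <;>
        by_cases c3 : (pvClassify cmd == some "npm") = true <;>
          by_cases c4 : (pvClassify cmd == some "downloaded") = true <;>
            by_cases c5 : (pvClassify cmd == some "other_install") = true <;>
              simp [c1, c2, c3, c4, c5]

-- ===== VERDICT (by name: the statement is the Claim_ definition above) =====
theorem extract_dependencies_from_commands_spec : Claim_equal_extract_dependencies_from_commands := by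
  intro commands _
  unfold Spec_extract_dependencies_from_commands extract_dependencies_from_commands extract_dependencies_from_commands_alt
  simp [pvFoldA_eq, pvRules]
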